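-- pv_equiv track=rewrite | github.com/TheTop10PonyVideos/Top10PonyVotingProcessing | modules/duplicate.py | mark_duplicate_cells
-- ===== SOURCE A (Python) =====
-- def mark_duplicate_cells(row: list[str], additional_row: list[str]) -> list[str]:
--     """Given a row of string values, check for identical values in the same row;
--     for each duplicated value found (not including the first), find the cell
--     with the same index in an additional input row, and annotate the cell to its
--     right to indicate the duplicate.
--     """
--     seen = set()
--     for i in range(len(row)):
--         cell = row[i]
--         if cell and cell in seen:
--             additional_row[i + 1] += "[DUPLICATE VIDEO]"
--         seen.add(cell)
--     return additional_row
-- ===== SOURCE B (Python) =====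
-- def mark_duplicate_cells(row: list[str], additional_row: list[str]) -> list[str]:
--     # Group-then-mark: first pass groups the indices of each non-empty value,
--     # second pass annotates the cell right of every non-first occurrence.
--     occurrences = {}
--     for i, cell in enumerate(row):
--         if cell:
--             occurrences.setdefault(cell, []).append(i)
--     for indices in occurrences.values():
--         for i in indices[1:]:
--             additional_row[i + 1] += "[DUPLICATE VIDEO]"
--     return additional_row
-- ===== Notes on version B (the rewrite author's own statement) =====
-- stated objective: alternative
-- what changed: A makes one pass growing a 'seen' set and marking as it goes; B first groups the indices of each non-empty value into a dict, then in a second pass marks, for every group, the cell to the right of each occurrence after the first.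
import Mathlib
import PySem

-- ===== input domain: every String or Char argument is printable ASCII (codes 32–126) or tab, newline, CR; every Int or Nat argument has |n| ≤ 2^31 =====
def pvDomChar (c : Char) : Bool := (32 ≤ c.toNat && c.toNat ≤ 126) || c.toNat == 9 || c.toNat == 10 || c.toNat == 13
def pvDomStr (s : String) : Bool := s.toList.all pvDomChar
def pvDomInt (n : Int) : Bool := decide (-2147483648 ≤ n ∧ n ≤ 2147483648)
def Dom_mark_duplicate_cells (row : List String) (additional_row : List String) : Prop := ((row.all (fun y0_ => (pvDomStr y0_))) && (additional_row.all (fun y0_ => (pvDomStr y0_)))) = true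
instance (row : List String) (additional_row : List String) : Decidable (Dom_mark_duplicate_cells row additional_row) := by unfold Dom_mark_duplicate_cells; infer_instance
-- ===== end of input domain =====

-- B replaces A's one-pass seen-set scan by a group-then-mark decomposition: a dict grouping each
-- non-empty value's indices, then per-group marking of every occurrence after the first
-- ("alternative"; return-value equivalence — both Pythons mutate additional_row in place).


-- ===== PORT A =====
-- additional_row[p] += "[DUPLICATE VIDEO]" (both Pythons contain this statement):
-- on IndexError (excluded by Pre_) leaves ar unchanged
def pvMark (ar : List String) (p : Int) : List String :=
  match PySem.List.pyGet? ar p with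
  | some s => PySem.List.pySetD ar p (s ++ "[DUPLICATE VIDEO]")
  | none => ar

def mark_duplicate_cells (row : List String) (additional_row : List String) : List String :=
  ((PySem.List.pyRange 0 row.length 1).foldl
    (fun (st : PySem.Set String × List String) i =>
      let cell := PySem.List.pyGetD row i ""
      let arr := if cell != "" && PySem.Set.contains st.1 cell then pvMark st.2 (i + 1) else st.2
      (PySem.Set.add st.1 cell, arr))
    (PySem.Set.empty, additional_row)).2

-- ===== PORT B =====
def mark_duplicate_cells_alt (row : List String) (additional_row : List String) : List String :=
  let occurrences : PySem.Dict String (List Int) :=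
    (PySem.List.enumerate row 0).foldl
      (fun d p => if p.2 != "" then d.modify p.2 [] (fun l => l ++ [p.1]) else d)
      PySem.Dict.empty
  occurrences.values.foldl
    (fun ar idxs =>
      (PySem.List.slice idxs (some 1) none).foldl (fun ar i => pvMark ar (i + 1)) ar)
    additional_row

-- ===== PRECONDITION & SPEC =====
-- Pre_ excludes exactly the inputs on which A raises IndexError: a duplicated non-empty cell at
-- index i with i+1 out of range of additional_row (B raises there too).
def Pre_mark_duplicate_cells (row : List String) (additional_row : List String) : Prop :=
  ∀ i : Nat, i < row.length → row.getD i "" ≠ "" → row.getD i "" ∈ row.take i →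
    i + 1 < additional_row.length
instance (row : List String) (additional_row : List String) : Decidable (Pre_mark_duplicate_cells row additional_row) := by unfold Pre_mark_duplicate_cells; infer_instance

def pvWitness_mark_duplicate_cells : List String × List String := (["a", "a"], ["x", "y", "z"])

def Spec_mark_duplicate_cells (row : List String) (additional_row : List String) (out : List String) : Prop := out = mark_duplicate_cells_alt row additional_row
instance (row : List String) (additional_row : List String) (out : List String) : Decidable (Spec_mark_duplicate_cells row additional_row out) := by unfold Spec_mark_duplicate_cells; infer_instance

-- ===== CLAIM (what is proved, stated in full; the proofs are below) =====
def Claim_equal_mark_duplicate_cells : Prop := ∀ (row : List String) (additional_row : List String), Dom_mark_duplicate_cells row additional_row → Pre_mark_duplicate_cells row additional_row → Spec_mark_duplicate_cells row additional_row (mark_duplicate_cells row additional_row)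

-- ===== LEMMAS AND PROOFS =====

-- the common shape both programs compute: mark cell j of ar iff row[j-1] is a non-empty duplicate
def pvDup (row : List String) (k : Nat) : Bool :=
  (row.getD k "" != "") && (row.take k).contains (row.getD k "")

def pvSpecUpTo (row : List String) (n : Nat) (ar : List String) : List String :=
  ar.mapIdx (fun j s => if 1 ≤ j ∧ j ≤ n ∧ pvDup row (j - 1) then s ++ "[DUPLICATE VIDEO]" else s)

-- ---------- A-side: A computes pvSpecUpTo ----------

theorem pvSpec_stable (row : List String) (n : Nat) (ar : List String) (h : pvDup row n = false) :
    pvSpecUpTo row n ar = pvSpecUpTo row (n + 1) ar := by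
  unfold pvSpecUpTo
  apply List.ext_getElem
  · simp
  intro j hj1 hj2
  rw [List.getElem_mapIdx, List.getElem_mapIdx]
  by_cases hje : j = n + 1
  · subst hje; simp [h]
  · refine if_congr ?_ rfl rfl
    constructor
    · rintro ⟨a, b, c⟩; exact ⟨a, by omega, c⟩
    · rintro ⟨a, b, c⟩; refine ⟨a, by omega, c⟩

theorem pvSpec_step (row : List String) (n : Nat) (ar : List String)
    (h : pvDup row n = true) (hlen : n + 1 < ar.length) :
    pvMark (pvSpecUpTo row n ar) ((n : Int) + 1) = pvSpecUpTo row (n + 1) ar := by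
  have hlen' : n + 1 < (pvSpecUpTo row n ar).length := by simp [pvSpecUpTo, hlen]
  have hcast : ((n : Int) + 1) = ((n + 1 : Nat) : Int) := by omega
  have hget : PySem.List.pyGet? (pvSpecUpTo row n ar) ((n : Int) + 1) =
      some ((pvSpecUpTo row n ar)[n+1]) := by
    rw [hcast, PySem.List.pyGet?_natCast]
    exact List.getElem?_eq_getElem hlen'
  have hval : (pvSpecUpTo row n ar)[n+1]'hlen' = ar[n+1] := by
    unfold pvSpecUpTo
    rw [List.getElem_mapIdx]
    exact if_neg (by rintro ⟨-, b, -⟩; omega)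
  unfold pvMark
  rw [hget, hcast]
  dsimp only
  rw [PySem.List.pySetD_natCast, hval]
  apply List.ext_getElem
  · simp [pvSpecUpTo]
  intro j hj1 hj2
  rw [List.getElem_set]
  unfold pvSpecUpTo
  rw [List.getElem_mapIdx, List.getElem_mapIdx]
  by_cases hje : j = n + 1
  · subst hje
    rw [if_pos rfl, if_pos ⟨by omega, by omega, by simpa using h⟩]
  · rw [if_neg (show ¬ n + 1 = j by omega)]
    refine if_congr ?_ rfl rfl
    constructor
    · rintro ⟨a, b, c⟩; exact ⟨a, by omega, c⟩
    · rintro ⟨a, b, c⟩; refine ⟨a, by omega, c⟩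

theorem pvSet_take_succ (row : List String) (n : Nat) (hn : n < row.length) :
    PySem.Set.add (PySem.Set.ofList (row.take n)) (row.getD n "") =
      PySem.Set.ofList (row.take (n + 1)) := by
  have h : row.take (n + 1) = row.take n ++ [row.getD n ""] := by
    rw [List.take_add_one, List.getElem?_eq_getElem hn]
    simp [List.getElem?_eq_getElem hn]
  rw [h]
  conv_rhs => rw [PySem.Set.ofList_eq_foldl, List.foldl_append, ← PySem.Set.ofList_eq_foldl]
  rfl

theorem pvA_aux (row ar : List String) (hpre : Pre_mark_duplicate_cells row ar)
    (n : Nat) (hn : n ≤ row.length) :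
    ((List.range n).foldl
      (fun (st : PySem.Set String × List String) (k : Nat) =>
        let cell := PySem.List.pyGetD row ((0 : Int) + (k : Int)) ""
        let arr := if cell != "" && PySem.Set.contains st.1 cell then pvMark st.2 ((0 : Int) + (k : Int) + 1) else st.2
        (PySem.Set.add st.1 cell, arr))
      (PySem.Set.empty, ar)) = (PySem.Set.ofList (row.take n), pvSpecUpTo row n ar) := by
  induction n with
  | zero =>
    have h0 : pvSpecUpTo row 0 ar = ar := by
      apply List.ext_getElem
      · simp [pvSpecUpTo]
      intro j hj1 hj2
      unfold pvSpecUpTo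
      rw [List.getElem_mapIdx]
      exact if_neg (by rintro ⟨a, b, -⟩; omega)
    simp only [List.range_zero, List.foldl_nil, List.take_zero, h0]
    rfl
  | succ n ih =>
    rw [List.range_succ, List.foldl_append, ih (by omega)]
    have hnl : n < row.length := by omega
    simp only [List.foldl_cons, List.foldl_nil]
    have hcell : PySem.List.pyGetD row ((0 : Int) + (n : Int)) "" = row.getD n "" := by
      rw [zero_add, PySem.List.pyGetD_natCast]
    rw [hcell]
    have hcont : PySem.Set.contains (PySem.Set.ofList (row.take n)) (row.getD n "") =
        (row.take n).contains (row.getD n "") := by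
      simp [PySem.Set.mem_ofList]
    have hcond : ((row.getD n "" != "") && PySem.Set.contains (PySem.Set.ofList (row.take n)) (row.getD n "")) = pvDup row n := by
      unfold pvDup; rw [hcont]
    rw [hcond]
    cases hd : pvDup row n with
    | false =>
      rw [if_neg (by simp)]
      exact congrArg₂ Prod.mk (pvSet_take_succ row n hnl) (pvSpec_stable row n ar hd)
    | true =>
      rw [if_pos rfl]
      have hidx : (0 : Int) + (n : Int) + 1 = (n : Int) + 1 := by omega
      rw [hidx]
      have hd2 := hd
      simp only [pvDup, Bool.and_eq_true, bne_iff_ne, ne_eq, List.contains_iff_mem] at hd2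
      have hlen : n + 1 < ar.length := hpre n hnl hd2.1 hd2.2
      exact congrArg₂ Prod.mk (pvSet_take_succ row n hnl) (pvSpec_step row n ar hd hlen)

theorem pvA_eq (row ar : List String) (hpre : Pre_mark_duplicate_cells row ar) :
    mark_duplicate_cells row ar = pvSpecUpTo row row.length ar := by
  unfold mark_duplicate_cells
  rw [PySem.List.pyRange_one]
  simp only [Int.sub_zero, Int.toNat_natCast, List.foldl_map]
  exact congrArg Prod.snd (pvA_aux row ar hpre row.length le_rfl)

-- ---------- B-side: B computes the same pvSpecUpTo ----------

-- B's grouping dict, named so the lemmas below can speak about it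
def pvOcc (row : List String) : PySem.Dict String (List Int) :=
  (PySem.List.enumerate row 0).foldl
    (fun d p => if p.2 != "" then d.modify p.2 [] (fun l => l ++ [p.1]) else d)
    PySem.Dict.empty

-- the group stored for value v: indices (as Int) of the non-empty cells equal to v, in order
def pvIdxs (row : List String) (v : String) : List Int :=
  ((((PySem.List.enumerate row 0).filter (fun p => p.2 != "")).filter
      (fun p => p.2 == v)).map (fun p => p.1))

-- the full list of marked positions B produces, in B's order
def pvMarks (row : List String) : List Int :=
  ((pvOcc row).values.map (fun idxs => (idxs.drop 1).map (· + 1))).flatten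

theorem pvOcc_getD (row : List String) (v : String) :
    (pvOcc row).getD v [] = pvIdxs row v := by
  unfold pvOcc pvIdxs
  rw [PySem.List.foldl_if_eq_foldl_filter]
  rw [show (List.foldl (fun d (p : Int × String) => d.modify p.2 [] (fun l => l ++ [p.1]))
        PySem.Dict.empty ((PySem.List.enumerate row 0).filter (fun p => p.2 != ""))) =
      (List.foldl (fun d (q : String × Int) => d.modify q.1 [] (fun l => l ++ [q.2]))
        PySem.Dict.empty
        (((PySem.List.enumerate row 0).filter (fun p => p.2 != "")).map Prod.swap)) from
    by rw [List.foldl_map]; rfl]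
  rw [PySem.Dict.getD_foldl_modify_append]
  simp [List.filter_map, List.map_map, Function.comp_def]

theorem pvOcc_keys (row : List String) :
    (pvOcc row).keys =
      PySem.Set.ofList (((PySem.List.enumerate row 0).filter (fun p => p.2 != "")).map (fun p => p.2)) := by
  unfold pvOcc
  rw [PySem.List.foldl_if_eq_foldl_filter]
  exact PySem.Dict.keys_foldl_modify_key
    ((PySem.List.enumerate row 0).filter (fun p => p.2 != ""))
    (fun p : Int × String => p.2) []
    (fun (_ : PySem.Dict String (List Int)) (p : Int × String) => fun l => l ++ [p.1])
    PySem.Dict.empty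

theorem pvOcc_keys_nodup (row : List String) : (pvOcc row).keys.Nodup := by
  unfold pvOcc
  rw [PySem.List.foldl_if_eq_foldl_filter]
  exact PySem.Dict.nodup_keys_foldl_modify_key
    ((PySem.List.enumerate row 0).filter (fun p => p.2 != ""))
    (fun p : Int × String => p.2) []
    (fun (_ : PySem.Dict String (List Int)) (p : Int × String) => fun l => l ++ [p.1])
    PySem.Dict.empty PySem.Dict.nodup_keys_empty

theorem pvMap_snd_enumerate (row : List String) :
    (PySem.List.enumerate row 0).map (fun p => p.2) = row := by
  apply List.ext_getElem
  · simp
  · intro j h1 h2; simp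

theorem pvMem_keys (row : List String) (v : String) :
    v ∈ (pvOcc row).keys ↔ v ≠ "" ∧ v ∈ row := by
  rw [pvOcc_keys, PySem.Set.mem_ofList]
  simp only [List.mem_map, List.mem_filter, bne_iff_ne, ne_eq]
  constructor
  · rintro ⟨p, ⟨hpe, hpne⟩, rfl⟩
    refine ⟨hpne, ?_⟩
    rw [← pvMap_snd_enumerate row]
    exact List.mem_map_of_mem hpe
  · rintro ⟨hv, hvr⟩
    obtain ⟨k, hk, hkv⟩ := List.getElem_of_mem hvr
    refine ⟨((k : Int), v), ⟨?_, hv⟩, rfl⟩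
    rw [List.mem_iff_getElem]
    refine ⟨k, by simpa using hk, ?_⟩
    rw [PySem.List.getElem_enumerate row 0 k (by simpa using hk)]
    simp [hkv]

theorem pvIdxs_eq (row : List String) (v : String) (hv : v ≠ "") :
    pvIdxs row v =
      ((List.range row.length).filter (fun k => row.getD k "" == v)).map (fun k : Nat => (k : Int)) := by
  induction row using List.reverseRecOn with
  | nil => simp [pvIdxs, PySem.List.enumerate_nil]
  | append_singleton l c ih =>
    unfold pvIdxs at *
    rw [PySem.List.enumerate_append, PySem.List.enumerate_cons, PySem.List.enumerate_nil,
      List.filter_append, List.filter_append, List.map_append, ih]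
    rw [show (l ++ [c]).length = l.length + 1 by simp, List.range_succ, List.filter_append,
      List.map_append]
    have hfc : List.filter (fun k => (l ++ [c]).getD k "" == v) (List.range l.length) =
        List.filter (fun k => l.getD k "" == v) (List.range l.length) := by
      apply List.filter_congr
      intro k hk
      rw [List.mem_range] at hk
      rw [List.getD_append l [c] "" k hk]
    rw [hfc]
    congr 1
    have hgd : (l ++ [c]).getD l.length "" = c := by
      simp [List.getD_eq_getElem?_getD]
    by_cases hcv : c = v
    · subst hcv
      simp [hv]
    · simp [hcv]

-- membership in the tail of a group: a later occurrence, i.e. one with an earlier equal cell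
theorem pvMem_drop1_filter_range (n : Nat) (P : Nat → Bool) (x : Nat) :
    x ∈ ((List.range n).filter P).drop 1 ↔
      x < n ∧ P x = true ∧ ∃ y, y < x ∧ P y = true := by
  have hmem : ∀ z, z ∈ (List.range n).filter P ↔ z < n ∧ P z = true := by
    intro z; simp [List.mem_filter, List.mem_range]
  have hpw : ((List.range n).filter P).Pairwise (· < ·) :=
    List.Pairwise.filter P List.pairwise_lt_range
  cases hl : (List.range n).filter P with
  | nil =>
    simp only [List.drop_nil, List.not_mem_nil, false_iff]
    rintro ⟨hx, hP, -⟩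
    have := (hmem x).2 ⟨hx, hP⟩
    rw [hl] at this
    exact List.not_mem_nil this
  | cons h t =>
    rw [hl] at hpw hmem
    have hlt : ∀ z ∈ t, h < z := (List.pairwise_cons.1 hpw).1
    have hle : ∀ z, z ∈ h :: t → h ≤ z := by
      intro z hz
      rcases List.mem_cons.1 hz with rfl | hz
      · exact le_rfl
      · exact le_of_lt (hlt z hz)
    simp only [List.drop_succ_cons, List.drop_zero]
    constructor
    · intro hx
      have hx' := (hmem x).1 (List.mem_cons_of_mem h hx)
      have hh := (hmem h).1 (List.mem_cons_self)
      exact ⟨hx'.1, hx'.2, h, hlt x hx, hh.2⟩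
    · rintro ⟨hxn, hPx, y, hyx, hPy⟩
      have hxl : x ∈ h :: t := (hmem x).2 ⟨hxn, hPx⟩
      have hyl : y ∈ h :: t := (hmem y).2 ⟨by omega, hPy⟩
      have : h < x := lt_of_le_of_lt (hle y hyl) hyx
      rcases List.mem_cons.1 hxl with rfl | hx
      · omega
      · exact hx

-- membership in one marked group
theorem pvMem_group (row : List String) (v : String) (hv : v ≠ "") (x : Int) :
    x ∈ ((pvIdxs row v).drop 1).map (· + 1) ↔
      ∃ k : Nat, x = (k : Int) + 1 ∧ k < row.length ∧ row.getD k "" = v ∧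
        ∃ y, y < k ∧ row.getD y "" = v := by
  rw [pvIdxs_eq row v hv, ← List.map_drop]
  simp only [List.mem_map, List.map_map]
  constructor
  · rintro ⟨k, hk, rfl⟩
    have := (pvMem_drop1_filter_range row.length _ k).1 hk
    simp only [beq_iff_eq] at this
    obtain ⟨h1, h2, y, h3, h4⟩ := this
    exact ⟨k, rfl, h1, h2, y, h3, h4⟩
  · rintro ⟨k, rfl, h1, h2, y, h3, h4⟩
    refine ⟨k, (pvMem_drop1_filter_range row.length _ k).2 ?_, rfl⟩
    simp only [beq_iff_eq]
    exact ⟨h1, h2, y, h3, h4⟩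

theorem pvMem_marks (row : List String) (x : Int) :
    x ∈ pvMarks row ↔ ∃ k : Nat, x = (k : Int) + 1 ∧ k < row.length ∧ pvDup row k = true := by
  unfold pvMarks
  rw [PySem.Dict.values_eq_map_keys (pvOcc row) (pvOcc_keys_nodup row) []]
  simp only [List.mem_flatten, List.mem_map, List.map_map]
  constructor
  · rintro ⟨L, ⟨v, hvk, rfl⟩, hxL⟩
    have hv := (pvMem_keys row v).1 hvk
    rw [Function.comp_apply, pvOcc_getD] at hxL
    obtain ⟨k, rfl, hkn, hkv, y, hyk, hyv⟩ := (pvMem_group row v hv.1 x).1 hxL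
    refine ⟨k, rfl, hkn, ?_⟩
    simp only [pvDup, Bool.and_eq_true, bne_iff_ne, ne_eq, List.contains_iff_mem]
    refine ⟨by rw [hkv]; exact hv.1, ?_⟩
    have hyk' : y < (row.take k).length := by
      rw [List.length_take]; omega
    have : (row.take k)[y] = row.getD k "" := by
      rw [List.getElem_take, hkv, ← hyv, List.getD_eq_getElem row "" (by omega)]
    rw [← this]
    exact List.getElem_mem hyk'
  · rintro ⟨k, rfl, hkn, hdup⟩
    simp only [pvDup, Bool.and_eq_true, bne_iff_ne, ne_eq, List.contains_iff_mem] at hdup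
    obtain ⟨hne, hmemtake⟩ := hdup
    set v := row.getD k "" with hvdef
    have hvrow : v ∈ row := by
      rw [hvdef, List.getD_eq_getElem row "" hkn]
      exact List.getElem_mem hkn
    obtain ⟨y, hyl, hyv⟩ := List.getElem_of_mem hmemtake
    have hyk : y < k := by
      have := hyl; rw [List.length_take] at this; omega
    have hyrow : row.getD y "" = v := by
      rw [List.getD_eq_getElem row "" (by omega), ← List.getElem_take (h := hyl), hyv]
    refine ⟨((pvOcc row).getD v []).drop 1 |>.map (· + 1), ⟨v, (pvMem_keys row v).2 ⟨hne, hvrow⟩, rfl⟩, ?_⟩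
    rw [pvOcc_getD]
    exact (pvMem_group row v hne _).2 ⟨k, rfl, hkn, rfl, y, hyk, hyrow⟩

theorem pvMarks_nodup (row : List String) : (pvMarks row).Nodup := by
  unfold pvMarks
  rw [PySem.Dict.values_eq_map_keys (pvOcc row) (pvOcc_keys_nodup row) []]
  rw [List.map_map, List.nodup_flatten]
  constructor
  · intro L hL
    rw [List.mem_map] at hL
    obtain ⟨v, hvk, rfl⟩ := hL
    rw [Function.comp_apply, pvOcc_getD]
    have hv := ((pvMem_keys row v).1 hvk).1
    rw [pvIdxs_eq row v hv, ← List.map_drop]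
    apply List.Nodup.map
    · intro a b hab; dsimp only at hab; omega
    · apply List.Nodup.map
      · intro a b hab; dsimp only at hab; exact_mod_cast hab
      · exact List.Nodup.sublist (List.drop_sublist 1 _)
          (List.Nodup.filter _ List.nodup_range)
  · rw [List.pairwise_map]
    apply List.Pairwise.imp_of_mem (R := (· ≠ ·)) ?_ (pvOcc_keys_nodup row)
    intro v w hvk hwk hvw
    rw [List.disjoint_left]
    intro x hxv hxw
    rw [Function.comp_apply, pvOcc_getD] at hxv hxw
    have hv := ((pvMem_keys row v).1 hvk).1
    have hw := ((pvMem_keys row w).1 hwk).1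
    obtain ⟨k, hk, -, hkv, -⟩ := (pvMem_group row v hv x).1 hxv
    obtain ⟨k', hk', -, hkw, -⟩ := (pvMem_group row w hw x).1 hxw
    have : k = k' := by omega
    subst this
    exact hvw (hkv ▸ hkw ▸ rfl)

-- marking a nodup list of in-range positions, in any order, is a pointwise rewrite
theorem pvFoldMark (ps : List Int) (ar : List String) (hnd : ps.Nodup)
    (hb : ∀ p ∈ ps, 0 ≤ p ∧ p.toNat < ar.length) :
    ps.foldl pvMark ar =
      ar.mapIdx (fun j s => if (j : Int) ∈ ps then s ++ "[DUPLICATE VIDEO]" else s) := by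
  induction ps generalizing ar with
  | nil =>
    apply List.ext_getElem
    · simp
    intro j h1 h2
    rw [List.getElem_mapIdx, if_neg (List.not_mem_nil)]
    rfl
  | cons p ps ih =>
    obtain ⟨hp0, hpl⟩ := hb p List.mem_cons_self
    obtain ⟨k, rfl⟩ : ∃ k : Nat, p = (k : Int) := ⟨p.toNat, (Int.toNat_of_nonneg hp0).symm⟩
    rw [Int.toNat_natCast] at hpl
    have hmark : pvMark ar ((k : Nat) : Int) = ar.set k (ar[k]'hpl ++ "[DUPLICATE VIDEO]") := by
      unfold pvMark
      rw [PySem.List.pyGet?_natCast, List.getElem?_eq_getElem hpl]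
      dsimp only
      rw [PySem.List.pySetD_natCast]
    rw [List.foldl_cons, hmark, ih _ (List.Nodup.of_cons hnd)
      (by intro q hq; rw [List.length_set]
          have := hb q (List.mem_cons_of_mem _ hq)
          simpa using this)]
    apply List.ext_getElem
    · simp
    intro j h1 h2
    rw [List.getElem_mapIdx, List.getElem_mapIdx, List.getElem_set]
    have hps : (((k : Nat) : Int) ∉ ps) := (List.nodup_cons.1 hnd).1
    by_cases hje : j = k
    · subst hje
      rw [if_pos rfl, if_neg (by exact_mod_cast hps), if_pos List.mem_cons_self]
    · rw [if_neg (by omega : ¬ k = j)]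
      refine if_congr ?_ rfl rfl
      rw [List.mem_cons]
      constructor
      · exact fun h => Or.inr h
      · rintro (h | h)
        · exact absurd (by exact_mod_cast h : j = k) hje
        · exact h

theorem pvB_eq (row ar : List String) (hpre : Pre_mark_duplicate_cells row ar) :
    mark_duplicate_cells_alt row ar = pvSpecUpTo row row.length ar := by
  have halt : mark_duplicate_cells_alt row ar = (pvMarks row).foldl pvMark ar := by
    show (pvOcc row).values.foldl
        (fun ar idxs =>
          (PySem.List.slice idxs (some 1) none).foldl (fun ar i => pvMark ar (i + 1)) ar) ar =
      (pvMarks row).foldl pvMark ar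
    unfold pvMarks
    rw [List.foldl_flatten, List.foldl_map]
    apply PySem.List.foldl_congr_mem
    intro a idxs _
    rw [PySem.List.slice_from idxs (by omega : (0:Int) ≤ 1), List.foldl_map]
    rfl
  have hbnd : ∀ p ∈ pvMarks row, 0 ≤ p ∧ p.toNat < ar.length := by
    intro p hp
    obtain ⟨k, rfl, hkn, hdup⟩ := (pvMem_marks row p).1 hp
    simp only [pvDup, Bool.and_eq_true, bne_iff_ne, ne_eq, List.contains_iff_mem] at hdup
    have := hpre k hkn hdup.1 hdup.2
    constructor
    · omega
    · rw [show ((k : Int) + 1).toNat = k + 1 by omega]; exact this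
  rw [halt, pvFoldMark _ ar (pvMarks_nodup row) hbnd]
  unfold pvSpecUpTo
  apply List.ext_getElem
  · simp
  intro j h1 h2
  rw [List.getElem_mapIdx, List.getElem_mapIdx]
  refine if_congr ?_ rfl rfl
  rw [pvMem_marks]
  constructor
  · rintro ⟨k, hk, hkn, hdup⟩
    have hjk : j = k + 1 := by omega
    subst hjk
    exact ⟨by omega, by omega, by simpa using hdup⟩
  · rintro ⟨hj1, hjn, hdup⟩
    exact ⟨j - 1, by omega, by omega, by simpa using hdup⟩

-- ===== VERDICT (by name: the statement is the Claim_ definition above) =====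
theorem mark_duplicate_cells_spec : Claim_equal_mark_duplicate_cells := by
  intro row ar _ hpre
  unfold Spec_mark_duplicate_cells
  rw [pvA_eq row ar hpre, pvB_eq row ar hpre]
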